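-- pv_equiv track=rewrite | github.com/wiseman/mefingram | mefingram/web/gae_server.py | transform_results
-- ===== SOURCE A (Python) =====
-- import itertools
--
-- YEARS = range(1999, 2014)
--
-- def transform_results(phrases, results):
--   xformed_results = []
--   for phrase in phrases:
--     phrase_results = []
--     for year in YEARS:
--       phrase_results.append(results[phrase].get(year, 0))
--     xformed_results.append(phrase_results)
--   return list(itertools.izip(YEARS, *xformed_results))
-- ===== SOURCE B (Python) =====
-- YEARS = range(1999, 2014)
--
-- def transform_results(phrases, results):
--   return [tuple([year] + [results[phrase].get(year, 0) for phrase in phrases])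
--           for year in YEARS]
-- ===== Notes on version B (the rewrite author's own statement) =====
-- stated objective: simpler
-- what changed: Replaces the intermediate phrases-by-years matrix plus izip transpose with a single comprehension that loops years on the outside and builds each output tuple directly.
import Mathlib
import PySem

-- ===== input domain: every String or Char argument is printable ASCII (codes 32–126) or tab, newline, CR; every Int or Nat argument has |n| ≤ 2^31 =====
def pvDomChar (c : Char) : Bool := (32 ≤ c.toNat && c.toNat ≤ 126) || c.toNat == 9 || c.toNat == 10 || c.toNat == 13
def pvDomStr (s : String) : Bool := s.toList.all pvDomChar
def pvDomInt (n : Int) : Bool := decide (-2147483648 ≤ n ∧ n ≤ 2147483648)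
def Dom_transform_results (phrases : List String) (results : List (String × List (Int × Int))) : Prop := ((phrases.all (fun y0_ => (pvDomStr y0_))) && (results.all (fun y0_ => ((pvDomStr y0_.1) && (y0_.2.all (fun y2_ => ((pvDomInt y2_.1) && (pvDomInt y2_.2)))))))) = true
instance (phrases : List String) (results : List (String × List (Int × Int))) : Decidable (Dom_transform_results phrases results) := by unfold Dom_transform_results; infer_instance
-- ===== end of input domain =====

-- B builds each per-year tuple directly (years outer, phrases inner) instead of
-- building a phrases×years matrix and transposing it with izip: simpler decomposition.

-- ===== PORT A =====
-- results[phrase]: raises KeyError if absent (excluded by Pre_); total port returns [] there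
def pvLookupA (results : List (String × List (Int × Int))) (p : String) : List (Int × Int) :=
  (results.lookup p).getD []

-- list(itertools.izip(first, *rest)): truncating zip, step for step
def pvIzip (first : List Int) (rest : List (List Int)) : List (List Int) :=
  match first with
  | [] => []
  | y :: ys =>
    if rest.all (fun l => l ≠ []) then
      (y :: rest.map (fun l => l.headD 0)) :: pvIzip ys (rest.map (fun l => l.tail))
    else []

def transform_results (phrases : List String) (results : List (String × List (Int × Int))) : List (List Int) :=
  let xformed := phrases.map (fun phrase =>
    (PySem.List.pyRange 1999 2014 1).map (fun year =>
      ((pvLookupA results phrase).lookup year).getD 0))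
  pvIzip (PySem.List.pyRange 1999 2014 1) xformed

-- ===== PORT B =====
def transform_results_alt (phrases : List String) (results : List (String × List (Int × Int))) : List (List Int) :=
  (PySem.List.pyRange 1999 2014 1).map (fun year =>
    year :: phrases.map (fun phrase =>
      (((results.lookup phrase).getD []).lookup year).getD 0))

-- ===== PRECONDITION & SPEC =====
-- Pre_: every phrase must be a key of results, else A raises KeyError
def Pre_transform_results (phrases : List String) (results : List (String × List (Int × Int))) : Prop :=
  phrases.all (fun p => (results.lookup p).isSome) = true
instance (phrases : List String) (results : List (String × List (Int × Int))) : Decidable (Pre_transform_results phrases results) := by unfold Pre_transform_results; infer_instance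

def pvWitness_transform_results : List String × (List (String × List (Int × Int))) :=
  (["a"], [("a", [(2000, 3)])])

def Spec_transform_results (phrases : List String) (results : List (String × List (Int × Int))) (out : List (List Int)) : Prop := out = transform_results_alt phrases results
instance (phrases : List String) (results : List (String × List (Int × Int))) (out : List (List Int)) : Decidable (Spec_transform_results phrases results out) := by unfold Spec_transform_results; infer_instance

-- ===== CLAIM (what is proved, stated in full; the proofs are below) =====
def Claim_equal_transform_results : Prop := ∀ (phrases : List String) (results : List (String × List (Int × Int))), Dom_transform_results phrases results → Pre_transform_results phrases results → Spec_transform_results phrases results (transform_results phrases results)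

-- ===== LEMMAS AND PROOFS =====

-- transposing a list of equal-length columns (each a map over ys) yields the row-major map
theorem pvIzip_map_map {α : Type} (ys : List Int) (ps : List α) (g : α → Int → Int) :
    pvIzip ys (ps.map (fun p => ys.map (g p))) = ys.map (fun y => y :: ps.map (fun p => g p y)) := by
  induction ys with
  | nil => simp [pvIzip]
  | cons y ys ih =>
    simp only [List.map_cons, pvIzip]
    rw [if_pos]
    · simp only [List.map_map, Function.comp_def, List.headD_cons, List.tail_cons]
      rw [ih]
    · simp

theorem transform_results_eq (phrases : List String) (results : List (String × List (Int × Int))) :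
    transform_results phrases results = transform_results_alt phrases results := by
  unfold transform_results transform_results_alt pvLookupA
  exact pvIzip_map_map _ phrases (fun p y => (((results.lookup p).getD []).lookup y).getD 0)

-- ===== VERDICT (by name: the statement is the Claim_ definition above) =====
theorem transform_results_spec : Claim_equal_transform_results := by
  intro phrases results _ _
  unfold Spec_transform_results
  exact transform_results_eq phrases results
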